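-- pv_equiv track=rewrite | github.com/FBergeron/AdventOfCode2020 | day_10/aoc_10b.py | find_next_joltages
-- ===== SOURCE A (Python) =====
-- def find_next_joltages(curr_joltage, joltages):
--     joltages_copy = joltages.copy()
--     res = []
--     if len(joltages_copy) == 0:
--         return res
--     while True:
--         if len(joltages_copy) == 0:
--             break
--         next_joltage = min(joltages_copy)
--         if next_joltage - curr_joltage > 3:
--             break
--         res.append(next_joltage)
--         joltages_copy.remove(next_joltage)
--     return res
-- ===== SOURCE B (Python) =====
-- def find_next_joltages(curr_joltage, joltages):
--     res = []
--     for j in sorted(joltages):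
--         if j - curr_joltage > 3:
--             break
--         res.append(j)
--     return res
-- ===== Notes on version B (the rewrite author's own statement) =====
-- stated objective: faster
-- what changed: Replaces the repeated min()+remove() scans with a single sort followed by taking the prefix of values within 3 of curr_joltage.
import Mathlib
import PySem

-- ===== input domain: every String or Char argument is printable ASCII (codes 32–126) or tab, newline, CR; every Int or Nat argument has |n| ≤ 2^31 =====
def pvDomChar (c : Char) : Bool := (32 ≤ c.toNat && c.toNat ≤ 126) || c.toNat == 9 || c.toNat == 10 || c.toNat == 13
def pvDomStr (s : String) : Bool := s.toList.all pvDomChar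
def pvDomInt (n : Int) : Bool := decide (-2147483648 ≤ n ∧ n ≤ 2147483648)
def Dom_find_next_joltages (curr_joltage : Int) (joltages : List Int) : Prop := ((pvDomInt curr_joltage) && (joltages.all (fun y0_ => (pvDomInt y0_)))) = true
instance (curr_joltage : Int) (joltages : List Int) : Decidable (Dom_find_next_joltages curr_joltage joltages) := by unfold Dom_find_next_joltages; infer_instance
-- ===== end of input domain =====

-- B replaces A's repeated min()+remove() scans by one sort and taking the prefix within 3 (objective: faster).

-- ===== PORT A =====
-- the while-loop: take the min, stop if it exceeds curr+3, else append it and remove it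
def pvLoopA (curr : Int) (l : List Int) (res : List Int) : List Int :=
  match PySem.List.min? l (fun x => x) with
  | none => res
  | some m =>
    if m - curr > 3 then res
    else
      match hr : PySem.List.remove? l m with
      | none => res  -- unreachable: m ∈ l, list.remove cannot raise here
      | some l' => pvLoopA curr l' (res ++ [m])
termination_by l.length
decreasing_by
  have hmem : m ∈ l := by
    by_contra hnm
    simp [(PySem.List.remove?_eq_none_iff l m).mpr hnm] at hr
  rw [PySem.List.remove?_eq_some_erase l m hmem] at hr
  have h2 := List.length_erase_of_mem hmem
  have h3 : l.erase m = l' := by injection hr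
  have h4 := List.length_pos_of_mem hmem
  rw [← h3]
  omega

def find_next_joltages (curr_joltage : Int) (joltages : List Int) : List Int :=
  if joltages.length = 0 then [] else pvLoopA curr_joltage joltages []

-- ===== PORT B =====
-- the for-loop over sorted(joltages) with break
def pvLoopB (curr : Int) : List Int → List Int
  | [] => []
  | j :: rest => if j - curr > 3 then [] else j :: pvLoopB curr rest

def find_next_joltages_alt (curr_joltage : Int) (joltages : List Int) : List Int :=
  pvLoopB curr_joltage (PySem.List.sorted joltages (fun x => x) false)

-- ===== PRECONDITION & SPEC =====
def Spec_find_next_joltages (curr_joltage : Int) (joltages : List Int) (out : List Int) : Prop := out = find_next_joltages_alt curr_joltage joltages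
instance (curr_joltage : Int) (joltages : List Int) (out : List Int) : Decidable (Spec_find_next_joltages curr_joltage joltages out) := by unfold Spec_find_next_joltages; infer_instance

-- ===== CLAIM (what is proved, stated in full; the proofs are below) =====
def Claim_equal_find_next_joltages : Prop := ∀ (curr_joltage : Int) (joltages : List Int), Dom_find_next_joltages curr_joltage joltages → Spec_find_next_joltages curr_joltage joltages (find_next_joltages curr_joltage joltages)

-- ===== LEMMAS AND PROOFS =====

-- sorted l = min :: sorted (l minus one occurrence of min)
lemma sorted_eq_min_cons (l : List Int) (m : Int)
    (hm : PySem.List.min? l (fun x => x) = some m) :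
    PySem.List.sorted l (fun x => x) false
      = m :: PySem.List.sorted (l.erase m) (fun x => x) false := by
  have hmem : m ∈ l := PySem.List.min?_mem hm
  have hmin : ∀ y ∈ l, m ≤ y := by
    intro y hy; exact PySem.List.min?_isMin hm y hy
  refine PySem.List.sorted_id_eq_of_perm_of_pairwise _ _ ?_ ?_
  · exact ((PySem.List.sorted_perm (l.erase m) (fun x => x) false).cons m).trans
      (List.perm_cons_erase hmem).symm
  · rw [List.pairwise_cons]
    refine ⟨?_, ?_⟩
    · intro y hy
      exact hmin y (l.erase_subset ((PySem.List.mem_sorted _ _ _ _).mp hy))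
    · exact PySem.List.sorted_pairwise (l.erase m) (fun x => x)

lemma loopA_eq (curr : Int) (l res : List Int) :
    pvLoopA curr l res = res ++ pvLoopB curr (PySem.List.sorted l (fun x => x) false) := by
  induction hn : l.length using Nat.strong_induction_on generalizing l res with
  | _ n ih =>
  rw [pvLoopA.eq_def]
  cases hm : PySem.List.min? l (fun x => x) with
  | none =>
    have : l = [] := (PySem.List.min?_eq_none_iff _ _).mp hm
    subst this
    simp [PySem.List.sorted, pvLoopB]
  | some m =>
    have hmem : m ∈ l := PySem.List.min?_mem hm
    rw [sorted_eq_min_cons l m hm]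
    dsimp only
    by_cases hgt : m - curr > 3
    · simp [hgt, pvLoopB]
    · rw [if_neg hgt]
      split
      · next heq =>
        exact absurd hmem ((PySem.List.remove?_eq_none_iff l m).mp heq)
      · next l' heq =>
        rw [PySem.List.remove?_eq_some_erase l m hmem] at heq
        cases heq
        have hlen : (l.erase m).length < n := by
          have := List.length_erase_of_mem hmem
          have := List.length_pos_of_mem hmem
          omega
        rw [ih _ hlen _ (res ++ [m]) rfl, pvLoopB]
        simp [hgt]

theorem find_next_joltages_spec : Claim_equal_find_next_joltages := by
  intro curr joltages _
  unfold Spec_find_next_joltages find_next_joltages find_next_joltages_alt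
  by_cases h : joltages.length = 0
  · have : joltages = [] := List.length_eq_zero_iff.mp h
    subst this
    simp [PySem.List.sorted, pvLoopB]
  · rw [if_neg h, loopA_eq]
    simp
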